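-- pv_equiv track=rewrite | github.com/tjbai/embd | rip/analysis/visual.py | deps_from_string
-- ===== SOURCE A (Python) =====
-- def deps_from_string(s: str):
--     deps = []
--
--     def is_breakpoint(i: int) -> bool:
--         things = {"EN", "AS", "ME", "MI"}
--         return s[i : i + 2] in things
--
--     l, r = 0, 0
--     while l < len(s):
--         if is_breakpoint(l):
--             r = l + 1
--             while r < len(s) and not is_breakpoint(r):
--                 r += 1
--             if r == len(s):
--                 deps.append(s[l:r])
--             else:
--                 deps.append(s[l : r - 2])
--             l = r
--
--         else:
--             l += 1
--
--     assert l == r == len(s)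
--     return deps
-- ===== SOURCE B (Python) =====
-- def deps_from_string(s: str):
--     markers = {"EN", "AS", "ME", "MI"}
--     P = [i for i in range(len(s)) if s[i:i + 2] in markers]
--     assert P or not s  # same sanity check as the original: a non-empty string must contain a marker
--     if not P:
--         return []
--     return [s[a:b - 2] for a, b in zip(P, P[1:])] + [s[P[-1]:]]
-- ===== Notes on version B (the rewrite author's own statement) =====
-- stated objective: simpler
-- what changed: B first builds the full list P of breakpoint indices with one comprehension and then slices between consecutive breakpoints (zip(P, P[1:])), replacing A's nested while-loops with mutable l/r scanning; B keeps A's sanity assert, so both raise AssertionError on non-empty marker-free strings (outside Pre_).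
-- outside the precondition, e.g. on deps_from_string('xy'): A raises AssertionError, B raises AssertionError
import Mathlib
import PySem

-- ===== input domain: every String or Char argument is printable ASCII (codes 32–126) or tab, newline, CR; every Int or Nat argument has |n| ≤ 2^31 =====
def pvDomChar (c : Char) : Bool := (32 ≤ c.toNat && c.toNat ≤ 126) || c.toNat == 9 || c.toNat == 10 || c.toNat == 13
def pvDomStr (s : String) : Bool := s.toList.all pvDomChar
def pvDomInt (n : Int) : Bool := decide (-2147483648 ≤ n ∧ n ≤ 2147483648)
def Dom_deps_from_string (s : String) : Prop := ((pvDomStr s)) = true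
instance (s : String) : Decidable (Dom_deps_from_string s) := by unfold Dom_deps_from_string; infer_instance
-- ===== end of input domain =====

-- B builds the breakpoint-index list once with a comprehension and slices between consecutive
-- breakpoints, replacing A's nested while-loops (objective: simpler); both versions raise
-- AssertionError on a non-empty string with no marker — those inputs are outside Pre_.

-- ===== PORT A =====
-- s[i:i+2] in {"EN", "AS", "ME", "MI"}  (shared by both ports, as in both Pythons)
def pvIsBp (s : List Char) (i : Int) : Bool :=
  [['E','N'], ['A','S'], ['M','E'], ['M','I']].contains
    (PySem.List.slice s (some i) (some (i + 2)))

-- inner 'while r < len(s) and not is_breakpoint(r): r += 1'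
def pvScanR (s : List Char) (r : Nat) : Nat :=
  if h : r < s.length ∧ ¬ pvIsBp s (r : Int) then pvScanR s (r + 1) else r
termination_by s.length - r
decreasing_by omega

-- r ≤ pvScanR s r  (cited by pvDepsA's decreasing_by)
theorem le_pvScanR (s : List Char) (r : Nat) : r ≤ pvScanR s r := by
  fun_induction pvScanR with
  | case1 r h ih => exact le_trans (by omega) ih
  | case2 r h => exact le_refl r

-- outer 'while l < len(s)' of A, with deps accumulated in the result (r = pvScanR s (l+1))
def pvDepsA (s : List Char) (l : Nat) : List (List Char) :=
  if hl : l < s.length then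
    if pvIsBp s (l : Int) then
      (if pvScanR s (l + 1) = s.length then
        PySem.List.slice s (some (l : Int)) (some ((pvScanR s (l + 1) : Nat) : Int))
       else
        PySem.List.slice s (some (l : Int)) (some (((pvScanR s (l + 1) : Nat) : Int) - 2)))
        :: pvDepsA s (pvScanR s (l + 1))
    else pvDepsA s (l + 1)
  else []
termination_by s.length - l
decreasing_by
  · have := le_pvScanR s (l + 1); omega
  · omega

def deps_from_string (s : String) : List String :=
  (pvDepsA s.toList 0).map (fun cs => String.ofList cs)

-- ===== PORT B =====
-- P = [i for i in range(len(s)) if s[i:i+2] in markers]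
-- (B's 'assert P or not s' raises only outside Pre_, so it is not modelled here)
def pvBpList (s : List Char) : List Int :=
  (PySem.List.pyRange 0 (s.length : Int) 1).filter (fun i => pvIsBp s i)

-- [s[a:b-2] for a, b in zip(P, P[1:])] + [s[P[-1]:]]   (or [] if not P)
def pvSegs (s : List Char) (P : List Int) : List (List Char) :=
  match P with
  | [] => []
  | p :: ps =>
    ((P.zip P.tail).map (fun ab => PySem.List.slice s (some ab.1) (some (ab.2 - 2))))
      ++ [PySem.List.slice s (some ((p :: ps).getLastD 0)) none]

def deps_from_string_alt (s : String) : List String :=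
  (pvSegs s.toList (pvBpList s.toList)).map (fun cs => String.ofList cs)

-- ===== PRECONDITION & SPEC =====
-- Pre_ excludes exactly the non-empty strings containing no marker pair, on which A's
-- final assert raises AssertionError (l reaches len(s) while r stays 0 there); B's
-- own assert raises on the same inputs.
def Pre_deps_from_string (s : String) : Prop :=
  s.toList = [] ∨ ∃ i < s.toList.length, pvIsBp s.toList (i : Int) = true
instance (s : String) : Decidable (Pre_deps_from_string s) := by
  unfold Pre_deps_from_string; infer_instance

def pvWitness_deps_from_string : String := "xENy"

def Spec_deps_from_string (s : String) (out : List String) : Prop := out = deps_from_string_alt s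
instance (s : String) (out : List String) : Decidable (Spec_deps_from_string s out) := by unfold Spec_deps_from_string; infer_instance

-- ===== CLAIM (what is proved, stated in full; the proofs are below) =====
def Claim_equal_deps_from_string : Prop := ∀ (s : String), Dom_deps_from_string s → Pre_deps_from_string s → Spec_deps_from_string s (deps_from_string s)

-- ===== LEMMAS AND PROOFS =====

-- breakpoint-index list from position l on
def pvBpFrom (s : List Char) (l : Nat) : List Int :=
  (PySem.List.pyRange (l : Int) (s.length : Int) 1).filter (fun i => pvIsBp s i)

lemma pvBpFrom_nil (s : List Char) (l : Nat) (h : s.length ≤ l) : pvBpFrom s l = [] := by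
  unfold pvBpFrom
  rw [PySem.List.pyRange_one_eq_nil (by exact_mod_cast h)]
  rfl

lemma pvBpFrom_cons_true (s : List Char) (l : Nat) (hl : l < s.length)
    (hb : pvIsBp s (l : Int) = true) :
    pvBpFrom s l = (l : Int) :: pvBpFrom s (l + 1) := by
  unfold pvBpFrom
  rw [PySem.List.pyRange_one_cons (by exact_mod_cast hl)]
  simp [hb]

lemma pvBpFrom_cons_false (s : List Char) (l : Nat) (hl : l < s.length)
    (hb : pvIsBp s (l : Int) = false) :
    pvBpFrom s l = pvBpFrom s (l + 1) := by
  unfold pvBpFrom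
  rw [PySem.List.pyRange_one_cons (by exact_mod_cast hl)]
  simp [hb]

-- splitting the breakpoint list at m, when [l, m) carries no breakpoint
lemma pvBpFrom_skip (s : List Char) (l m : Nat) (hlm : l ≤ m) (hm : m ≤ s.length)
    (hno : ∀ j : Nat, l ≤ j → j < m → pvIsBp s (j : Int) = false) :
    pvBpFrom s l = pvBpFrom s m := by
  unfold pvBpFrom
  rw [PySem.List.pyRange_one_append (l : Int) (m : Int) (s.length : Int)
        (by exact_mod_cast hlm) (by exact_mod_cast hm),
      List.filter_append]
  have : (PySem.List.pyRange (l : Int) (m : Int) 1).filter (fun i => pvIsBp s i) = [] := by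
    rw [List.filter_eq_nil_iff]
    intro i hi
    rw [PySem.List.mem_pyRange_one] at hi
    have hi0 : 0 ≤ i := le_trans (by exact_mod_cast Nat.zero_le l) hi.1
    obtain ⟨j, rfl⟩ := Int.eq_ofNat_of_zero_le hi0
    simp [hno j (by exact_mod_cast hi.1) (by exact_mod_cast hi.2)]
  rw [this, List.nil_append]

-- pvScanR's spec
lemma pvScanR_spec (s : List Char) (r0 : Nat) (h0 : r0 ≤ s.length) :
    r0 ≤ pvScanR s r0 ∧ pvScanR s r0 ≤ s.length ∧
    (∀ j : Nat, r0 ≤ j → j < pvScanR s r0 → pvIsBp s (j : Int) = false) ∧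
    (pvScanR s r0 = s.length ∨ pvIsBp s ((pvScanR s r0 : Nat) : Int) = true) := by
  generalize hn : s.length - r0 = n
  induction n generalizing r0 with
  | zero =>
    have hr : r0 = s.length := by omega
    rw [pvScanR, dif_neg (by omega)]
    exact ⟨le_refl _, h0, by omega, Or.inl hr⟩
  | succ n ih =>
    rw [pvScanR]
    by_cases h : r0 < s.length ∧ ¬ pvIsBp s (r0 : Int) = true
    · rw [dif_pos h]
      obtain ⟨ih1, ih2, ih3, ih4⟩ := ih (r0 + 1) (by omega) (by omega)
      refine ⟨by omega, ih2, ?_, ih4⟩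
      intro j hj1 hj2
      rcases Nat.eq_or_lt_of_le hj1 with rfl | hlt
      · simpa using h.2
      · exact ih3 j hlt hj2
    · rw [dif_neg h]
      rw [not_and] at h
      refine ⟨le_refl _, h0, by omega, ?_⟩
      rcases Nat.eq_or_lt_of_le h0 with heq | hlt
      · exact Or.inl heq
      · exact Or.inr (by simpa using h hlt)

-- a position at or past len(s) is never a breakpoint (the slice there is empty)
lemma pvIsBp_of_len_le (s : List Char) (r : Nat) (h : s.length ≤ r) :
    pvIsBp s (r : Int) = false := by
  unfold pvIsBp
  have h2 : ((r : Int) + 2) = ((r + 2 : Nat) : Int) := by push_cast; ring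
  rw [h2, PySem.List.slice_natCast, List.drop_eq_nil_of_le h]
  simp

-- pvSegs on a singleton is the single trailing slice
lemma pvSegs_singleton (s : List Char) (a : Int) :
    pvSegs s [a] = [PySem.List.slice s (some a) none] := by
  simp [pvSegs]

-- pvSegs on a two-or-more element list peels one segment
lemma pvSegs_cons_cons (s : List Char) (a b : Int) (t : List Int) :
    pvSegs s (a :: b :: t) =
      PySem.List.slice s (some a) (some (b - 2)) :: pvSegs s (b :: t) := by
  simp [pvSegs, List.getLastD]

-- the final (r = len) slice equals the tail slice
lemma slice_to_len (s : List Char) (l : Nat) :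
    PySem.List.slice s (some (l : Int)) (some (s.length : Int)) =
      PySem.List.slice s (some (l : Int)) none := by
  rw [PySem.List.slice_natCast, PySem.List.slice_from_natCast]
  exact List.take_of_length_le (by simp)

-- main invariant: A's outer loop from l computes B's segments of pvBpFrom s l
lemma pvDepsA_eq_pvSegs (s : List Char) (l : Nat) :
    pvDepsA s l = pvSegs s (pvBpFrom s l) := by
  generalize hn : s.length - l = n
  induction n using Nat.strong_induction_on generalizing l with
  | _ n ih =>
  rw [pvDepsA]
  by_cases hl : l < s.length
  · rw [dif_pos hl]
    by_cases hb : pvIsBp s (l : Int) = true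
    · rw [if_pos hb]
      obtain ⟨h1, h2, h3, h4⟩ := pvScanR_spec s (l + 1) (by omega)
      set r := pvScanR s (l + 1) with hrdef
      have hcons : pvBpFrom s l = (l : Int) :: pvBpFrom s r :=
        (pvBpFrom_cons_true s l hl hb).trans
          (by rw [pvBpFrom_skip s (l + 1) r h1 h2 h3])
      have ihr : pvDepsA s r = pvSegs s (pvBpFrom s r) :=
        ih (s.length - r) (by omega) r rfl
      rw [hcons, ihr]
      rcases h4 with hlen | hbp
      · rw [pvBpFrom_nil s r (by omega), if_pos hlen, hlen, slice_to_len, pvSegs_singleton]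
        rfl
      · have hrlt : r < s.length := by
          by_contra hc
          rw [pvIsBp_of_len_le s r (by omega)] at hbp
          exact Bool.false_ne_true hbp
        have hr : pvBpFrom s r = (r : Int) :: pvBpFrom s (r + 1) :=
          pvBpFrom_cons_true s r hrlt hbp
        rw [hr, pvSegs_cons_cons, ← hr, if_neg (by omega : ¬ r = s.length)]
    · rw [if_neg hb, pvBpFrom_cons_false s l hl (by simpa using hb)]
      exact ih (s.length - (l + 1)) (by omega) (l + 1) rfl
  · rw [dif_neg hl, pvBpFrom_nil s l (by omega), pvSegs]

lemma pvBpList_eq_from_zero (s : List Char) : pvBpList s = pvBpFrom s 0 := by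
  unfold pvBpList pvBpFrom; norm_num

-- ===== VERDICT (by name: the statement is the Claim_ definition above) =====
theorem deps_from_string_spec : Claim_equal_deps_from_string := by
  intro s _ _
  unfold Spec_deps_from_string deps_from_string deps_from_string_alt
  rw [pvDepsA_eq_pvSegs, pvBpList_eq_from_zero]
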